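-- pv_equiv track=rewrite | github.com/Lancher/coding-challenge | *interview/amazon/count_faults.py | count_faults
-- ===== SOURCE A (Python) =====
-- import collections
--
-- def count_faults(logs):
--     res = 0
--
--     svr_fault = collections.defaultdict(int)
--
--     for log in logs:
--         svr, status = log.split(' ')
--         if status == 'success':
--             svr_fault[svr] = 0
--         else:
--             svr_fault[svr] += 1
--
--         if svr_fault[svr] == 3:
--             res += 1
--             svr_fault[svr] = 0
--
--     return res
-- ===== SOURCE B (Python) =====
-- def count_faults(logs):
--     # Two-pass rewrite: first group statuses per server (insertion order),
--     # then count triple-failure streaks per server independently.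
--     groups = {}
--     for log in logs:
--         svr, status = log.split(' ')
--         groups.setdefault(svr, []).append(status)
--     res = 0
--     for statuses in groups.values():
--         streak = 0
--         for status in statuses:
--             if status == 'success':
--                 streak = 0
--             else:
--                 streak += 1
--                 if streak == 3:
--                     res += 1
--                     streak = 0
--     return res
-- ===== Notes on version B (the rewrite author's own statement) =====
-- stated objective: alternative
-- what changed: Replaces A's single stateful pass over the interleaved log (a dict of per-server streak counters updated in place) with a two-pass decomposition: first group each server's statuses into ordered lists, then count triple-failure streaks per server with a local counter.
-- outside the precondition, e.g. on count_faults(['a fail fail']): A raises ValueError, B raises ValueError; on count_faults(['afail']): A raises ValueError, B raises ValueError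
import Mathlib
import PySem

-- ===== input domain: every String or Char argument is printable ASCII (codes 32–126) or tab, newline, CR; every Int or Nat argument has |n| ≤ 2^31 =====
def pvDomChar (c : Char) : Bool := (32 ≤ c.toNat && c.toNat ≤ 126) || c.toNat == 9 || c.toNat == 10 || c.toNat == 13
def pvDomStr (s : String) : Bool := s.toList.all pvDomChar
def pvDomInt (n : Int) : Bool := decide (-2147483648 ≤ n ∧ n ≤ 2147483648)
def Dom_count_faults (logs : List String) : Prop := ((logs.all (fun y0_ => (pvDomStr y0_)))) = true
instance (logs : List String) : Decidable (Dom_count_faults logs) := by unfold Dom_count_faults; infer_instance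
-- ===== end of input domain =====

-- B replaces A's single stateful pass (a dict of per-server counters) by a two-pass
-- decomposition: group statuses per server, then count triple-failure streaks per group
-- (objective: alternative; same asymptotic cost).

-- ===== PORT A =====
-- single pass; state = (res, dict server ↦ consecutive-failure counter)
def count_faults (logs : List String) : Int :=
  (logs.foldl
    (fun (st : Int × PySem.Dict String Int) log =>
      match PySem.Str.split? log " " with
      | some [svr, status] =>
        let d := if status == "success" then st.2.insert svr 0
                 else st.2.modify svr 0 (· + 1)
        if d.getD svr 0 == 3 then (st.1 + 1, d.insert svr 0) else (st.1, d)
      | _ => st)  -- unreachable under Pre_ (Python raises ValueError here)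
    (0, PySem.Dict.empty)).1

-- ===== PORT B =====
def count_faults_alt (logs : List String) : Int :=
  -- pass 1: group statuses per server, in insertion order
  let groups : PySem.Dict String (List String) :=
    logs.foldl
      (fun g log =>
        let parts := (PySem.Str.split? log " ").getD []
        if parts.length == 2 then g.modify (parts.getD 0 "") [] (· ++ [parts.getD 1 ""])
        else g)  -- unreachable under Pre_ (Python raises ValueError here)
      PySem.Dict.empty
  -- pass 2: per server, walk its statuses with a streak counter
  groups.values.foldl
    (fun res statuses =>
      (statuses.foldl
        (fun (p : Int × Int) status =>
          if status == "success" then (p.1, 0)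
          else
            let k := p.2 + 1
            if k == 3 then (p.1 + 1, 0) else (p.1, k))
        (res, 0)).1)
    0

-- ===== PRECONDITION & SPEC =====
-- Pre_ excludes logs on which "svr, status = log.split(' ')" raises ValueError
-- (not exactly two space-separated fields); both A and B raise there.
def Pre_count_faults (logs : List String) : Prop :=
  ∀ log ∈ logs, ((PySem.Str.split? log " ").getD []).length = 2
instance (logs : List String) : Decidable (Pre_count_faults logs) := by
  unfold Pre_count_faults; infer_instance

def pvWitness_count_faults : List String :=
  ["a fail", "b fail", "a fail", "a crash", "b success", "a success"]

def Spec_count_faults (logs : List String) (out : Int) : Prop := out = count_faults_alt logs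
instance (logs : List String) (out : Int) : Decidable (Spec_count_faults logs out) := by unfold Spec_count_faults; infer_instance

-- ===== CLAIM (what is proved, stated in full; the proofs are below) =====
def Claim_equal_count_faults : Prop := ∀ (logs : List String), Dom_count_faults logs → Pre_count_faults logs → Spec_count_faults logs (count_faults logs)

-- ===== LEMMAS AND PROOFS =====

-- parsed view of a log line (used only by the proofs)
def cfParse (log : String) : String × String :=
  match PySem.Str.split? log " " with
  | some [svr, status] => (svr, status)
  | _ => ("", "")

-- A's loop body on parsed pairs
def cfStepA (st : Int × PySem.Dict String Int) (p : String × String) :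
    Int × PySem.Dict String Int :=
  let d := if p.2 == "success" then st.2.insert p.1 0 else st.2.modify p.1 0 (· + 1)
  if d.getD p.1 0 == 3 then (st.1 + 1, d.insert p.1 0) else (st.1, d)

-- streak-counting characterisation of both loops' per-server effect
def cfRun : Int → List String → Int
  | _, [] => 0
  | c, st :: rest =>
    if st == "success" then cfRun 0 rest
    else if c + 1 == 3 then 1 + cfRun 0 rest else cfRun (c + 1) rest

-- statuses of server s, in order, in the parsed list
def cfStat (ps : List (String × String)) (s : String) : List String :=
  (ps.filter (fun p => p.1 == s)).map Prod.snd

lemma pre_split (log : String)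
    (h : ((PySem.Str.split? log " ").getD []).length = 2) :
    ∃ a b, PySem.Str.split? log " " = some [a, b] := by
  cases ho : PySem.Str.split? log " " with
  | none => rw [ho] at h; simp at h
  | some l =>
    rw [ho] at h
    match l, h with
    | [a, b], _ => exact ⟨a, b, rfl⟩

lemma foldA_parse (logs : List String) (h : Pre_count_faults logs)
    (init : Int × PySem.Dict String Int) :
    logs.foldl
      (fun (st : Int × PySem.Dict String Int) log =>
        match PySem.Str.split? log " " with
        | some [svr, status] =>
          let d := if status == "success" then st.2.insert svr 0
                   else st.2.modify svr 0 (· + 1)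
          if d.getD svr 0 == 3 then (st.1 + 1, d.insert svr 0) else (st.1, d)
        | _ => st)
      init
      = (logs.map cfParse).foldl cfStepA init := by
  rw [List.foldl_map]
  refine PySem.List.foldl_congr_mem _ _ _ init (fun acc log hm => ?_)
  obtain ⟨a, b, ho⟩ := pre_split log (h log hm)
  simp [ho, cfParse, cfStepA]

lemma foldB_parse (logs : List String) (h : Pre_count_faults logs)
    (init : PySem.Dict String (List String)) :
    logs.foldl
      (fun g log =>
        let parts := (PySem.Str.split? log " ").getD []
        if parts.length == 2 then g.modify (parts.getD 0 "") [] (· ++ [parts.getD 1 ""])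
        else g)
      init
      = (logs.map cfParse).foldl (fun d p => d.modify p.1 [] (· ++ [p.2])) init := by
  rw [List.foldl_map]
  refine PySem.List.foldl_congr_mem _ _ _ init (fun acc log hm => ?_)
  obtain ⟨a, b, ho⟩ := pre_split log (h log hm)
  simp [ho, cfParse]

-- shifting one summand of a sum over a Nodup index list
lemma sum_map_shift (S : List String) (hS : S.Nodup) (s₀ : String) (h₀ : s₀ ∈ S)
    (f g : String → Int) (δ : Int)
    (hne : ∀ s ∈ S, s ≠ s₀ → f s = g s) (h : f s₀ = δ + g s₀) :
    (S.map f).sum = δ + (S.map g).sum := by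
  induction S with
  | nil => simp at h₀
  | cons x rest ih =>
    rcases List.nodup_cons.mp hS with ⟨hx, hrest⟩
    by_cases hxs : x = s₀
    · subst hxs
      have : rest.map f = rest.map g := by
        refine List.map_congr_left (fun s hs => ?_)
        exact hne s (by simp [hs]) (fun e => hx (e ▸ hs))
      simp only [List.map_cons, List.sum_cons, h, this]
      ring
    · rcases List.mem_cons.mp h₀ with h0 | h0
      · exact absurd h0.symm hxs
      · have := ih hrest h0 (fun s hs hne' => hne s (by simp [hs]) hne')
        simp only [List.map_cons, List.sum_cons, this,
          hne x (by simp) hxs]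
        ring

-- characterisation of A's fold: result = res + per-server streak counts
lemma cfA_char (ps : List (String × String)) (S : List String) (hS : S.Nodup)
    (hcov : ∀ p ∈ ps, p.1 ∈ S) :
    ∀ (res : Int) (d : PySem.Dict String Int),
      (ps.foldl cfStepA (res, d)).1
        = res + (S.map (fun s => cfRun (d.getD s 0) (cfStat ps s))).sum := by
  induction ps with
  | nil => intro res d; simp [cfStat, cfRun]
  | cons p rest ih =>
    intro res d
    obtain ⟨s₀, st⟩ := p
    have hcov' : ∀ q ∈ rest, q.1 ∈ S := fun q hq => hcov q (by simp [hq])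
    have h₀ : s₀ ∈ S := hcov (s₀, st) (by simp)
    -- the step
    set r := cfStepA (res, d) (s₀, st) with hr
    have key : cfRun (d.getD s₀ 0) (st :: cfStat rest s₀)
        = (r.1 - res) + cfRun (r.2.getD s₀ 0) (cfStat rest s₀) := by
      by_cases hsu : st == "success"
      · simp [cfRun, hsu, cfStepA, hr, PySem.Dict.getD_insert_self]
      · simp only [cfStepA, hr, hsu]
        by_cases h3 : d.getD s₀ 0 + 1 = 3
        · simp [cfRun, hsu, h3, PySem.Dict.getD_modify_self,
            PySem.Dict.getD_insert_self]
        · simp [cfRun, hsu, h3, PySem.Dict.getD_modify_self]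
    have hne : ∀ s, s ≠ s₀ → r.2.getD s 0 = d.getD s 0 := by
      intro s hs
      simp only [cfStepA, hr]
      split <;>
      · split <;>
        simp [PySem.Dict.getD_insert_of_ne _ _ _ hs,
          PySem.Dict.getD_modify_of_ne _ _ _ hs]
    have hstat : ∀ s, s ≠ s₀ →
        cfStat ((s₀, st) :: rest) s = cfStat rest s := by
      intro s hs
      simp [cfStat, (by simpa using Ne.symm hs : ¬ (s₀ == s) = true)]
    have hstat0 : cfStat ((s₀, st) :: rest) s₀ = st :: cfStat rest s₀ := by
      simp [cfStat]
    calc (((s₀, st) :: rest).foldl cfStepA (res, d)).1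
        = (rest.foldl cfStepA r).1 := by simp [hr]
      _ = r.1 + (S.map (fun s => cfRun (r.2.getD s 0) (cfStat rest s))).sum := by
          have := ih hcov' r.1 r.2; simpa using this
      _ = res + (S.map (fun s => cfRun (d.getD s 0) (cfStat ((s₀, st) :: rest) s))).sum := by
          have hsum := sum_map_shift S hS s₀ h₀
            (fun s => cfRun (d.getD s 0) (cfStat ((s₀, st) :: rest) s))
            (fun s => cfRun (r.2.getD s 0) (cfStat rest s))
            (r.1 - res)
            (fun s _ hs => by simp only [hstat s hs, hne s hs])
            (by simp only [hstat0, key])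
          rw [hsum]; ring

-- B's inner loop body, named for the proofs (defeq to the lambda in the port)
def cfStepB (p : Int × Int) (status : String) : Int × Int :=
  if status == "success" then (p.1, 0)
  else
    let k := p.2 + 1
    if k == 3 then (p.1 + 1, 0) else (p.1, k)

-- B's inner streak loop computes cfRun
lemma cfB_inner (statuses : List String) :
    ∀ (res c : Int),
      (statuses.foldl cfStepB (res, c)).1 = res + cfRun c statuses := by
  induction statuses with
  | nil => intro res c; simp [cfRun]
  | cons st rest ih =>
    intro res c
    rw [List.foldl_cons]
    by_cases hsu : st == "success"
    · have h1 : cfStepB (res, c) st = (res, 0) := by simp [cfStepB, hsu]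
      rw [h1, ih]
      simp [cfRun, hsu]
    · by_cases h3 : c + 1 = 3
      · have h1 : cfStepB (res, c) st = (res + 1, 0) := by simp [cfStepB, hsu, h3]
        rw [h1, ih]
        simp [cfRun, hsu, h3]
        ring
      · have h1 : cfStepB (res, c) st = (res, c + 1) := by simp [cfStepB, hsu, h3]
        rw [h1, ih]
        simp [cfRun, hsu, h3]

-- ===== VERDICT (by name: the statement is the Claim_ definition above) =====
theorem count_faults_spec : Claim_equal_count_faults := by
  intro logs _ hpre
  unfold Spec_count_faults count_faults count_faults_alt
  rw [foldA_parse logs hpre, foldB_parse logs hpre]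
  set ps := logs.map cfParse with hps
  set groups := ps.foldl (fun d p => d.modify p.1 [] (· ++ [p.2])) PySem.Dict.empty with hg
  have hnodup : groups.keys.Nodup := by
    rw [hg]
    exact PySem.Dict.nodup_keys_foldl_modify_key ps Prod.fst []
      (fun _ p => (· ++ [p.2])) PySem.Dict.empty (by simp)
  have hkeys : groups.keys = PySem.Set.ofList (ps.map Prod.fst) := by
    rw [hg]
    rw [PySem.Dict.keys_foldl_modify_key]
    simp [PySem.Set.update_nil_left]
  have hcov : ∀ p ∈ ps, p.1 ∈ groups.keys := by
    intro p hp
    rw [hkeys]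
    simp only [PySem.Set.mem_ofList]
    exact List.mem_map_of_mem hp
  have hgetD : ∀ s, groups.getD s [] = cfStat ps s := by
    intro s
    rw [hg, PySem.Dict.getD_foldl_modify_append]
    simp [cfStat]
  have hitems : ∀ q ∈ groups.items, q.2 = cfStat ps q.1 := by
    intro q hq
    obtain ⟨k, v⟩ := q
    have := PySem.Dict.getD_of_mem_items groups hq hnodup ([] : List String)
    rw [← this, hgetD]
  -- rewrite B into a sum over values, then over keys
  have hB : groups.values.foldl
      (fun res statuses =>
        (statuses.foldl
          (fun (p : Int × Int) status =>
            if status == "success" then (p.1, 0)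
            else
              let k := p.2 + 1
              if k == 3 then (p.1 + 1, 0) else (p.1, k))
          (res, 0)).1) 0
      = (groups.keys.map (fun s => cfRun 0 (cfStat ps s))).sum := by
    have h1 : groups.values.foldl
        (fun res statuses =>
          (statuses.foldl
            (fun (p : Int × Int) status =>
              if status == "success" then (p.1, 0)
              else
                let k := p.2 + 1
                if k == 3 then (p.1 + 1, 0) else (p.1, k))
            (res, 0)).1) 0
        = groups.values.foldl (fun res statuses => res + cfRun 0 statuses) 0 := by
      refine PySem.List.foldl_congr_mem _ _ _ 0 (fun res v _ => ?_)
      exact cfB_inner v res 0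
    rw [h1, PySem.List.foldl_add]
    have : groups.values.map (fun v => cfRun 0 v)
        = groups.keys.map (fun s => cfRun 0 (cfStat ps s)) := by
      show (groups.items.map Prod.snd).map _ = (groups.items.map Prod.fst).map _
      rw [List.map_map, List.map_map]
      refine List.map_congr_left (fun q hq => ?_)
      simp [hitems q hq]
    rw [this]; simp
  rw [hB]
  have := cfA_char ps groups.keys hnodup hcov 0 PySem.Dict.empty
  rw [this]
  simp [PySem.Dict.getD_empty]
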